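-- pv_equiv track=rewrite | github.com/Hali-creater/AI-Client-Hunter-Agent | utils.py | prioritize_emails
-- ===== SOURCE A (Python) =====
-- def prioritize_emails(emails):
--     """
--     Prioritizes general business contact emails.
--     """
--     priority_keywords = ['info', 'contact', 'hello', 'sales', 'support', 'hi']
--     prioritized = []
--     others = []
--
--     for email in emails:
--         user = email.split('@')[0]
--         if any(keyword in user for keyword in priority_keywords):
--             prioritized.append(email)
--         else:
--             others.append(email)
--
--     return prioritized + others
-- ===== SOURCE B (Python) =====
-- def _is_priority(email):
--     user = email.split('@')[0]
--     return any(k in user for k in ['info', 'contact', 'hello', 'sales', 'support', 'hi'])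
--
--
-- def prioritize_emails(emails):
--     """
--     Prioritizes general business contact emails.
--     """
--     return sorted(emails, key=lambda e: 0 if _is_priority(e) else 1)
-- ===== Notes on version B (the rewrite author's own statement) =====
-- stated objective: idiomatic
-- what changed: Replaces the explicit two-bucket partition loop with a single stable sort by a 0/1 priority key, relying on sort stability to preserve the original order within each group.
import Mathlib
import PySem

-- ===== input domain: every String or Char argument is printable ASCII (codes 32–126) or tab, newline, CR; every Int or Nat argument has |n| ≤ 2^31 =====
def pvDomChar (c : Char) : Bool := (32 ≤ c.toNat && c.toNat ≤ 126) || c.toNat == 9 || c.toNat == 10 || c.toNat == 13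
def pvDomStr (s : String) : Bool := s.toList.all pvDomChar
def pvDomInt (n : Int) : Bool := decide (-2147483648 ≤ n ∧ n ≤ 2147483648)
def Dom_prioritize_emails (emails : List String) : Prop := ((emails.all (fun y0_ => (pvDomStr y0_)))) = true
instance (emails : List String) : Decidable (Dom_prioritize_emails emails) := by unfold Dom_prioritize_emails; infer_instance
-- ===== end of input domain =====

-- B replaces A's explicit two-bucket partition loop with a single stable sort by a 0/1 priority key (idiomatic; not faster).


-- ===== PORT A =====
def prioritize_emails (emails : List String) : List String :=
  let st := emails.foldl (fun (acc : List String × List String) email =>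
      if ["info", "contact", "hello", "sales", "support", "hi"].any
           (fun keyword => PySem.Str.isIn keyword (((PySem.Str.split? email "@").getD []).headD "")) then
        (acc.1 ++ [email], acc.2)
      else
        (acc.1, acc.2 ++ [email])) ([], [])
  st.1 ++ st.2

-- ===== PORT B =====
def pvIsPriority (email : String) : Bool :=
  ["info", "contact", "hello", "sales", "support", "hi"].any
    (fun k => PySem.Str.isIn k (((PySem.Str.split? email "@").getD []).headD ""))

def prioritize_emails_alt (emails : List String) : List String :=
  PySem.List.sorted emails (fun e => if pvIsPriority e then (0 : Int) else 1) false

-- ===== PRECONDITION & SPEC =====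
def Spec_prioritize_emails (emails : List String) (out : List String) : Prop := out = prioritize_emails_alt emails
instance (emails : List String) (out : List String) : Decidable (Spec_prioritize_emails emails out) := by unfold Spec_prioritize_emails; infer_instance

-- ===== CLAIM (what is proved, stated in full; the proofs are below) =====
def Claim_equal_prioritize_emails : Prop := ∀ (emails : List String), Dom_prioritize_emails emails → Spec_prioritize_emails emails (prioritize_emails emails)

-- ===== LEMMAS AND PROOFS =====

-- The 0/1 priority key of B.
def pvKey (e : String) : Int := if pvIsPriority e then 0 else 1

def pvBef (a b : String) : Bool := decide (pvKey a < pvKey b)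

theorem pvBef_iff (a b : String) : pvBef a b = true ↔ (pvIsPriority a = true ∧ pvIsPriority b = false) := by
  simp only [pvBef, pvKey, decide_eq_true_eq]
  by_cases ha : pvIsPriority a <;> by_cases hb : pvIsPriority b <;> simp [ha, hb]

-- A's fold keeps the invariant (processed-priority, processed-others).
theorem pvFoldA (xs : List String) : ∀ (P Q : List String),
    xs.foldl (fun (acc : List String × List String) email =>
      if pvIsPriority email then (acc.1 ++ [email], acc.2) else (acc.1, acc.2 ++ [email])) (P, Q)
    = (P ++ xs.filter pvIsPriority, Q ++ xs.filter (fun e => !pvIsPriority e)) := by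
  induction xs with
  | nil => intro P Q; simp
  | cons x xs ih =>
    intro P Q
    simp only [List.foldl_cons]
    by_cases hx : pvIsPriority x
    · rw [if_pos hx, ih]
      simp [hx]
    · rw [if_neg hx, ih]
      simp [hx]

-- Inserting x into a block of priority items followed by a block of others.
theorem pvInsert (x : String) : ∀ (P Q : List String),
    (∀ y ∈ P, pvIsPriority y = true) → (∀ y ∈ Q, pvIsPriority y = false) →
    PySem.List.insertBy pvBef x (P ++ Q)
      = if pvIsPriority x then P ++ x :: Q else P ++ Q ++ [x] := by
  intro P Q hP hQ
  by_cases hx : pvIsPriority x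
  · rw [if_pos hx]
    induction P with
    | nil =>
      cases Q with
      | nil => rfl
      | cons q qs =>
        have hq : pvBef x q = true := (pvBef_iff x q).2 ⟨hx, hQ q (by simp)⟩
        simp [PySem.List.insertBy, hq]
    | cons y P ihP =>
      have hy : pvBef x y = false := by
        rw [Bool.eq_false_iff]
        intro h
        have h2 := ((pvBef_iff x y).1 h).2
        simp [hP y (by simp)] at h2
      simp only [List.cons_append, PySem.List.insertBy, hy]
      simp only [Bool.false_eq_true, if_false]
      rw [ihP (fun z hz => hP z (by simp [hz]))]
  · rw [if_neg hx]
    apply PySem.List.insertBy_of_forall_not_before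
    intro y _
    rw [Bool.eq_false_iff]
    intro h
    exact hx ((pvBef_iff x y).1 h).1

-- B's insertion-sort fold keeps the same invariant.
theorem pvFoldB (xs : List String) : ∀ (P Q : List String),
    (∀ y ∈ P, pvIsPriority y = true) → (∀ y ∈ Q, pvIsPriority y = false) →
    xs.foldl (fun acc x => PySem.List.insertBy pvBef x acc) (P ++ Q)
      = (P ++ xs.filter pvIsPriority) ++ (Q ++ xs.filter (fun e => !pvIsPriority e)) := by
  induction xs with
  | nil => intro P Q _ _; simp
  | cons x xs ih =>
    intro P Q hP hQ
    simp only [List.foldl_cons]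
    rw [pvInsert x P Q hP hQ]
    by_cases hx : pvIsPriority x
    · rw [if_pos hx]
      have hPx : ∀ y ∈ P ++ [x], pvIsPriority y = true := by
        intro y hy
        rcases List.mem_append.1 hy with h | h
        · exact hP y h
        · simp at h; rw [h]; exact hx
      have : P ++ x :: Q = (P ++ [x]) ++ Q := by simp
      rw [this, ih (P ++ [x]) Q hPx hQ]
      simp [hx]
    · rw [if_neg hx]
      have hQx : ∀ y ∈ Q ++ [x], pvIsPriority y = false := by
        intro y hy
        rcases List.mem_append.1 hy with h | h
        · exact hQ y h
        · simp at h; rw [h]; exact Bool.eq_false_iff.2 hx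
      have : P ++ Q ++ [x] = P ++ (Q ++ [x]) := by simp
      rw [this, ih P (Q ++ [x]) hP hQx]
      simp [hx]

-- ===== VERDICT (by name: the statement is the Claim_ definition above) =====
theorem prioritize_emails_spec : Claim_equal_prioritize_emails := by
  intro emails _
  show prioritize_emails emails = prioritize_emails_alt emails
  have hA : prioritize_emails emails
      = emails.filter pvIsPriority ++ emails.filter (fun e => !pvIsPriority e) := by
    show ((emails.foldl (fun (acc : List String × List String) email =>
      if pvIsPriority email then (acc.1 ++ [email], acc.2) else (acc.1, acc.2 ++ [email])) ([], [])).1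
      ++ (emails.foldl (fun (acc : List String × List String) email =>
      if pvIsPriority email then (acc.1 ++ [email], acc.2) else (acc.1, acc.2 ++ [email])) ([], [])).2) = _
    rw [pvFoldA emails [] []]; simp
  have hB : prioritize_emails_alt emails
      = emails.filter pvIsPriority ++ emails.filter (fun e => !pvIsPriority e) := by
    show PySem.List.sorted emails pvKey false = _
    rw [PySem.List.sorted_eq_foldl_insertBy]
    have := pvFoldB emails [] [] (by simp) (by simp)
    simpa [pvBef] using this
  rw [hA, hB]
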